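-- pv_equiv track=rewrite | github.com/Badi-maviyah-321/zeko | app.py | normalize_shortcut
-- ===== SOURCE A (Python) =====
-- def normalize_shortcut(shortcut):
--     """Normalizes key terms in shortcuts to match keyboard library conventions."""
--     replacements = {
--         'control': 'ctrl', 'option': 'alt', 'windows': 'win', 'spacebar': 'space',
--         'shift': 'shift', 'tab': 'tab', 'enter': 'enter', 'escape': 'esc',
--         'delete': 'delete', 'insert': 'insert', 'home': 'home', 'end': 'end',
--         'pageup': 'pgup', 'pagedown': 'pgdn', 'arrowup': 'up', 'arrowdown': 'down',
--         'arrowleft': 'left', 'arrowright': 'right',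
--     }
--     for old, new in replacements.items():
--         shortcut = shortcut.replace(old, new)
--     return shortcut
-- ===== SOURCE B (Python) =====
-- def normalize_shortcut(shortcut):
--     """Normalizes key terms in shortcuts to match keyboard library conventions."""
--     replacements = {
--         'control': 'ctrl', 'option': 'alt', 'windows': 'win', 'spacebar': 'space',
--         'escape': 'esc', 'pageup': 'pgup', 'pagedown': 'pgdn', 'arrowup': 'up',
--         'arrowdown': 'down', 'arrowleft': 'left', 'arrowright': 'right',
--     }
--     out = []
--     i = 0
--     n = len(shortcut)
--     while i < n:
--         for old, new in replacements.items():
--             if shortcut.startswith(old, i):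
--                 out.append(new)
--                 i += len(old)
--                 break
--         else:
--             out.append(shortcut[i])
--             i += 1
--     return ''.join(out)
-- ===== Notes on version B (the rewrite author's own statement) =====
-- stated objective: alternative
-- what changed: Replaces 18 sequential full-string str.replace passes (7 of them identity no-ops) by a single left-to-right scan that tries the 11 non-identity aliases at each position, emits the replacement and skips past the matched key; Pre_ excludes strings containing one of the four substrings 'spacebarscape', 'pageupagedown', 'arrowupageup', 'arrowupagedown', on which an earlier pass's replacement value abuts original text and re-forms a later alias, so A's sequential passes cascade while B's single scan replaces each occurrence once; there either value is defensible (see cites).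
-- outside the precondition, e.g. on normalize_shortcut('spacebarscape'): A returns 'spacesc', B returns 'spacescape'; on normalize_shortcut('pageupagedown'): A returns 'pgupgdn', B returns 'pgupagedown'; on normalize_shortcut('arrowupageup'): A returns 'upgup', B returns 'upageup'
import Mathlib
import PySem

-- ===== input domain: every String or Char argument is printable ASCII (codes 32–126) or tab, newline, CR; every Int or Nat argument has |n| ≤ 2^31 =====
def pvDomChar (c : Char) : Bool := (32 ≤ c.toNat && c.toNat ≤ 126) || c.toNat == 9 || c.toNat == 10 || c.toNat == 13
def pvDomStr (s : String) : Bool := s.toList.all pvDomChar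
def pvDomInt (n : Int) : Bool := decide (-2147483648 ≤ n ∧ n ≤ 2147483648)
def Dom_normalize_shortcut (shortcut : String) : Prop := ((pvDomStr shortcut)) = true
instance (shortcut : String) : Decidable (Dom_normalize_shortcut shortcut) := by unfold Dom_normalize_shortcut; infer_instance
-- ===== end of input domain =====

-- B replaces A's 18 sequential full-string replace passes by one left-to-right scan over the
-- 11 non-identity aliases; Pre_ excludes the four cascade substrings on which the two differ.

-- ===== PORT A =====
def pairsA : List (String × String) :=
  [("control", "ctrl"), ("option", "alt"), ("windows", "win"), ("spacebar", "space"),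
   ("shift", "shift"), ("tab", "tab"), ("enter", "enter"), ("escape", "esc"),
   ("delete", "delete"), ("insert", "insert"), ("home", "home"), ("end", "end"),
   ("pageup", "pgup"), ("pagedown", "pgdn"), ("arrowup", "up"), ("arrowdown", "down"),
   ("arrowleft", "left"), ("arrowright", "right")]

def normalize_shortcut (shortcut : String) : String :=
  pairsA.foldl (fun s p => PySem.Str.replace s p.1 p.2) shortcut

-- ===== PORT B =====
-- the (non-identity) replacement table of Source B, in dict order
def pairsB : List (List Char × List Char) :=
  [("control".toList, "ctrl".toList), ("option".toList, "alt".toList),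
   ("windows".toList, "win".toList), ("spacebar".toList, "space".toList),
   ("escape".toList, "esc".toList), ("pageup".toList, "pgup".toList),
   ("pagedown".toList, "pgdn".toList), ("arrowup".toList, "up".toList),
   ("arrowdown".toList, "down".toList), ("arrowleft".toList, "left".toList),
   ("arrowright".toList, "right".toList)]

-- Source B's while loop: at each position try the table entries in order; on a match emit the
-- replacement and skip the matched key, otherwise emit the character and advance by one
def scanC (C : List (List Char × List Char)) : List Char → List Char
  | [] => []
  | c :: t =>
    match C.find? (fun p => p.1.isPrefixOf (c :: t)) with
    | some p => p.2 ++ scanC C (t.drop (p.1.length - 1))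
    | none => c :: scanC C t
termination_by s => s.length
decreasing_by all_goals (simp; try omega)

def normalize_shortcut_alt (shortcut : String) : String :=
  String.ofList (scanC pairsB shortcut.toList)

-- ===== PRECONDITION & SPEC =====
-- Pre_ excludes strings containing one of the four substrings 'spacebarscape', 'pageupagedown',
-- 'arrowupageup', 'arrowupagedown': there an earlier pass's replacement value abuts original text
-- and re-forms a later alias, so A's sequential passes cascade while B's single scan replaces
-- each occurrence once; on such accidental concatenations either value is defensible and
-- neither is specified (the excluded examples below show both values).
def Pre_normalize_shortcut (shortcut : String) : Prop :=
  PySem.Str.isIn "spacebarscape" shortcut = false ∧ PySem.Str.isIn "pageupagedown" shortcut = false ∧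
  PySem.Str.isIn "arrowupageup" shortcut = false ∧ PySem.Str.isIn "arrowupagedown" shortcut = false
instance (shortcut : String) : Decidable (Pre_normalize_shortcut shortcut) := by
  unfold Pre_normalize_shortcut; infer_instance

def pvWitness_normalize_shortcut : String := "ctrl+shift+a"

def Spec_normalize_shortcut (shortcut : String) (out : String) : Prop :=
  out = normalize_shortcut_alt shortcut
instance (shortcut : String) (out : String) : Decidable (Spec_normalize_shortcut shortcut out) := by
  unfold Spec_normalize_shortcut; infer_instance

-- ===== CLAIM (what is proved, stated in full; the proofs are below) =====
def Claim_equal_normalize_shortcut : Prop := ∀ (shortcut : String), Dom_normalize_shortcut shortcut → Pre_normalize_shortcut shortcut → Spec_normalize_shortcut shortcut (normalize_shortcut shortcut)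

-- ===== LEMMAS AND PROOFS =====

def badPats : List (List Char) :=
  ["spacebarscape".toList, "pageupagedown".toList, "arrowupageup".toList, "arrowupagedown".toList]

def NoBad (l : List Char) : Prop := ∀ p ∈ badPats, ¬ p <:+: l

theorem noBad_of_pre (s : String) (h : Pre_normalize_shortcut s) : NoBad s.toList := by
  obtain ⟨h1, h2, h3, h4⟩ := h
  intro p hp hi
  simp only [badPats, List.mem_cons, List.not_mem_nil, or_false] at hp
  rcases hp with rfl | rfl | rfl | rfl
  · exact absurd ((PySem.Str.isIn_iff_infix _ _).mpr hi) (by rw [h1]; simp)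
  · exact absurd ((PySem.Str.isIn_iff_infix _ _).mpr hi) (by rw [h2]; simp)
  · exact absurd ((PySem.Str.isIn_iff_infix _ _).mpr hi) (by rw [h3]; simp)
  · exact absurd ((PySem.Str.isIn_iff_infix _ _).mpr hi) (by rw [h4]; simp)

theorem noBad_infix {l l' : List Char} (h : NoBad l) (hs : l' <:+: l) : NoBad l' :=
  fun p hp hi => h p hp (hi.trans hs)

-- ---- repl1: the one-key replace recursion (Python str.replace, old nonempty) ----
def repl1 (old new : List Char) : List Char → List Char
  | [] => []
  | c :: t =>
    if old.isPrefixOf (c :: t) then new ++ repl1 old new (t.drop (old.length - 1))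
    else c :: repl1 old new t
termination_by s => s.length
decreasing_by all_goals (simp; try omega)

theorem repl1_nil (old new : List Char) : repl1 old new [] = [] := by rw [repl1]

theorem repl1_cons_pos (old new : List Char) (c : Char) (t : List Char)
    (h : old.isPrefixOf (c :: t) = true) :
    repl1 old new (c :: t) = new ++ repl1 old new (t.drop (old.length - 1)) := by
  rw [repl1, if_pos h]

theorem repl1_cons_neg (old new : List Char) (c : Char) (t : List Char)
    (h : ¬ old.isPrefixOf (c :: t) = true) :
    repl1 old new (c :: t) = c :: repl1 old new t := by
  rw [repl1, if_neg h]

-- prefix helpers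
theorem prefix_split {k a X : List Char} (h : k <+: a ++ X) : a <+: k ∨ k <+: a :=
  List.prefix_or_prefix_of_prefix (List.prefix_append a X) h

theorem clean1 {k a X : List Char} (h1 : ¬ a <+: k) (h2 : ¬ k <+: a) : ¬ k <+: a ++ X :=
  fun h => (prefix_split h).elim h1 h2

theorem prefix_drop {a k X : List Char} (hak : a <+: k) (h : k <+: a ++ X) :
    k.drop a.length <+: X := by
  obtain ⟨r, rfl⟩ := hak
  rw [List.drop_left]
  obtain ⟨w, hw⟩ := h
  rw [List.append_assoc] at hw
  exact ⟨w, List.append_cancel_left hw⟩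

-- drop through a nonempty prefix
theorem drop_pred_cons {k r : List Char} {c : Char} {t : List Char} (hk : k ≠ [])
    (h : k ++ r = c :: t) : t.drop (k.length - 1) = r := by
  cases k with
  | nil => exact absurd rfl hk
  | cons a k' =>
    cases h
    simp

-- ---- A's PySem replace equals repl1 ----
theorem go_eq (old new : List Char) (hold : old ≠ []) :
    ∀ (fuel : Nat) (l acc : List Char), l.length ≤ fuel →
      PySem.Chars.replace.go old new fuel l acc = acc.reverse ++ repl1 old new l := by
  intro fuel
  induction fuel with
  | zero =>
    intro l acc hl
    have hnil : l = [] := by cases l <;> simp_all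
    subst hnil
    rw [PySem.Chars.replace.go.eq_def]
    simp [repl1_nil]
  | succ n ih =>
    intro l acc hl
    cases l with
    | nil =>
      rw [PySem.Chars.replace.go.eq_def]
      simp [repl1_nil]
    | cons c t =>
      rw [PySem.Chars.replace.go.eq_def]
      simp only []
      by_cases h : old.isPrefixOf (c :: t)
      · rw [if_pos h, repl1_cons_pos old new c t h]
        have hlen : (List.drop old.length (c :: t)).length ≤ n := by
          have h1 : 1 ≤ old.length := by cases old with | nil => exact absurd rfl hold | cons a b => simp
          simp only [List.length_cons] at hl
          simp only [List.length_drop, List.length_cons]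
          omega
        rw [ih _ _ hlen]
        have hdrop : List.drop old.length (c :: t) = t.drop (old.length - 1) := by
          cases old with
          | nil => exact absurd rfl hold
          | cons a o' => simp
        rw [hdrop]
        simp
      · rw [if_neg h, ih t (c :: acc) (by simpa using Nat.le_of_succ_le_succ hl),
            repl1_cons_neg old new c t h]
        simp

theorem replace_eq (s old new : List Char) (hold : old ≠ []) :
    PySem.Chars.replace s old new = repl1 old new s := by
  have hne : old.isEmpty = false := by simpa using hold
  unfold PySem.Chars.replace
  rw [hne]
  simpa using go_eq old new hold s.length s [] le_rfl

-- identity replacement is a no-op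
theorem repl1_id (k : List Char) (hk : k ≠ []) : ∀ s, repl1 k k s = s := by
  have main : ∀ n s, s.length ≤ n → repl1 k k s = s := by
    intro n
    induction n with
    | zero =>
      intro s hs
      have : s = [] := by cases s <;> simp_all
      subst this; exact repl1_nil k k
    | succ n ih =>
      intro s hs
      cases s with
      | nil => exact repl1_nil k k
      | cons c t =>
        by_cases hp : k.isPrefixOf (c :: t)
        · rw [repl1_cons_pos k k c t hp]
          obtain ⟨r, hr⟩ := List.isPrefixOf_iff_prefix.mp hp
          rw [drop_pred_cons hk hr]
          rw [ih r (by
            have := congrArg List.length hr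
            simp at this
            have : 1 ≤ k.length := by cases k with | nil => exact absurd rfl hk | cons a b => simp
            simp at hs
            omega)]
          exact hr
        · rw [repl1_cons_neg k k c t hp, ih t (by simpa using Nat.le_of_succ_le_succ hs)]
  exact fun s => main s.length s le_rfl

-- ---- scanC equations and basic lemmas ----
theorem scanC_nil (C : List (List Char × List Char)) : scanC C [] = [] := by rw [scanC]

theorem scanC_cons_some (C : List (List Char × List Char)) (c : Char) (t : List Char)
    (p : List Char × List Char) (h : C.find? (fun p => p.1.isPrefixOf (c :: t)) = some p) :
    scanC C (c :: t) = p.2 ++ scanC C (t.drop (p.1.length - 1)) := by rw [scanC, h]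

theorem scanC_cons_none (C : List (List Char × List Char)) (c : Char) (t : List Char)
    (h : C.find? (fun p => p.1.isPrefixOf (c :: t)) = none) :
    scanC C (c :: t) = c :: scanC C t := by rw [scanC, h]

theorem scanC_nil_table : ∀ s, scanC [] s = s := by
  intro s
  induction s with
  | nil => exact scanC_nil []
  | cons c t ih => rw [scanC_cons_none [] c t rfl, ih]

-- skipping a match-free block
theorem scanC_skip (C : List (List Char × List Char)) :
    ∀ (a u : List Char), (∀ p < a.length, ∀ m ∈ C, ¬ m.1 <+: (a.drop p ++ u)) →
      scanC C (a ++ u) = a ++ scanC C u := by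
  intro a
  induction a with
  | nil => intro u _; simp
  | cons b a' ih =>
    intro u H
    have hnone : C.find? (fun p => p.1.isPrefixOf (b :: (a' ++ u))) = none := by
      rw [List.find?_eq_none]
      intro m hm
      simp only [List.isPrefixOf_iff_prefix]
      exact H 0 (by simp) m hm
    rw [List.cons_append, scanC_cons_none C b (a' ++ u) hnone,
        ih u (fun p hp m hm => H (p + 1) (by simpa using hp) m hm)]
    simp

theorem repl1_skip (k v : List Char) :
    ∀ (a u : List Char), (∀ q < a.length, ¬ k <+: (a.drop q ++ u)) →
      repl1 k v (a ++ u) = a ++ repl1 k v u := by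
  intro a
  induction a with
  | nil => intro u _; simp
  | cons b a' ih =>
    intro u H
    have hneg : ¬ k.isPrefixOf (b :: (a' ++ u)) = true := by
      simp only [List.isPrefixOf_iff_prefix]
      exact H 0 (by simp)
    rw [List.cons_append, repl1_cons_neg k v b (a' ++ u) hneg,
        ih u (fun q hq => H (q + 1) (by simpa using hq))]
    simp

theorem repl1_prefix (k v X : List Char) (hk : k ≠ []) :
    repl1 k v (k ++ X) = v ++ repl1 k v X := by
  cases k with
  | nil => exact absurd rfl hk
  | cons a k' =>
    rw [List.cons_append, repl1_cons_pos (a :: k') v a (k' ++ X)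
      (List.isPrefixOf_iff_prefix.mpr ⟨X, by simp⟩)]
    congr 1
    congr 1
    simp

-- the scan cannot create a key occurrence out of nothing (under the table-shape hypothesis)
theorem noCreate (C : List (List Char × List Char)) :
    ∀ (n : Nat) (t w : List Char), t.length ≤ n →
      (∀ q < w.length, ∀ m ∈ C, (w.drop q <+: m.2 ∨ m.2 <+: w.drop q) → w.drop q <+: m.1) →
      w <+: scanC C t → w <+: t := by
  intro n
  induction n with
  | zero =>
    intro t w ht _ h
    have : t = [] := by cases t <;> simp_all
    subst this
    rw [scanC_nil] at h
    simpa using h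
  | succ n ih =>
    intro t w ht Hw h
    cases t with
    | nil => rw [scanC_nil] at h; simpa using h
    | cons d r =>
      cases w with
      | nil => exact List.nil_prefix
      | cons e w' =>
        cases hf : C.find? (fun p => p.1.isPrefixOf (d :: r)) with
        | some m =>
          rw [scanC_cons_some C d r m hf] at h
          have h1 : (e :: w') <+: m.1 :=
            Hw 0 (by simp) m (List.mem_of_find?_eq_some hf) (prefix_split h).symm
          have hps0 := List.find?_some hf
          have hps : m.1.isPrefixOf (d :: r) = true := hps0
          have h2 : m.1 <+: d :: r := List.isPrefixOf_iff_prefix.mp hps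
          exact h1.trans h2
        | none =>
          rw [scanC_cons_none C d r hf] at h
          obtain ⟨he, h'⟩ := List.cons_prefix_cons.mp h
          subst he
          have hrec := ih r w' (by simpa using Nat.le_of_succ_le_succ ht)
            (fun q hq m hm => Hw (q + 1) (by simpa using hq) m hm) h'
          exact List.cons_prefix_cons.mpr ⟨rfl, hrec⟩

-- ---- the one-key step: composing one more replace equals scanning with one more table row ----
theorem step (C : List (List Char × List Char)) (k v : List Char) (hk : k ≠ [])
    (hC : ∀ m ∈ C, m.1 ≠ [])
    (Hnc : ∀ q < k.length, 1 ≤ q → ∀ m ∈ C,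
      (k.drop q <+: m.2 ∨ m.2 <+: k.drop q) → k.drop q <+: m.1)
    (Hs1 : ∀ m ∈ C, ∀ t', NoBad (m.1 ++ t') → ∀ q < m.2.length,
      ¬ k <+: (m.2.drop q ++ scanC C t'))
    (Hs2 : ∀ u, NoBad (k ++ u) → ∀ p < k.length, 1 ≤ p → ∀ m ∈ C,
      ¬ m.1 <+: (k.drop p ++ u)) :
    ∀ s, NoBad s → repl1 k v (scanC C s) = scanC (C ++ [(k, v)]) s := by
  have main : ∀ n s, s.length ≤ n → NoBad s →
      repl1 k v (scanC C s) = scanC (C ++ [(k, v)]) s := by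
    intro n
    induction n with
    | zero =>
      intro s hs _
      have : s = [] := by cases s <;> simp_all
      subst this
      rw [scanC_nil, scanC_nil, repl1_nil]
    | succ n ih =>
      intro s hs hNB
      cases s with
      | nil => rw [scanC_nil, scanC_nil, repl1_nil]
      | cons c t =>
        cases hf : C.find? (fun p => p.1.isPrefixOf (c :: t)) with
        | some m =>
          have hm : m ∈ C := List.mem_of_find?_eq_some hf
          have hps0 := List.find?_some hf
          have hps : m.1.isPrefixOf (c :: t) = true := hps0
          have hpre : m.1 <+: c :: t := List.isPrefixOf_iff_prefix.mp hps
          obtain ⟨r, hr⟩ := hpre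
          have hdrop : t.drop (m.1.length - 1) = r := drop_pred_cons (hC m hm) hr
          have hfap : (C ++ [(k, v)]).find? (fun p => p.1.isPrefixOf (c :: t)) = some m := by
            rw [List.find?_append, hf]; rfl
          rw [scanC_cons_some C c t m hf, scanC_cons_some (C ++ [(k, v)]) c t m hfap, hdrop]
          have hNBr : NoBad (m.1 ++ r) := by rw [hr]; exact hNB
          rw [repl1_skip k v m.2 (scanC C r) (Hs1 m hm r hNBr)]
          congr 1
          apply ih r
          · have := congrArg List.length hr
            have h1 : 1 ≤ m.1.length := by
              cases hcm : m.1 with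
              | nil => exact absurd hcm (hC m hm)
              | cons a b => simp
            simp at this hs
            omega
          · exact noBad_infix hNB (List.IsSuffix.isInfix ⟨m.1, hr⟩)
        | none =>
          have hCnone : ∀ m ∈ C, ¬ m.1 <+: c :: t := by
            intro m hm
            have := List.find?_eq_none.mp hf m hm
            simpa [List.isPrefixOf_iff_prefix] using this
          by_cases hkp : k.isPrefixOf (c :: t)
          · -- the new key matches here
            obtain ⟨u, hu⟩ := List.isPrefixOf_iff_prefix.mp hkp
            have hdrop : t.drop (k.length - 1) = u := drop_pred_cons hk hu
            have hNBku : NoBad (k ++ u) := by rw [hu]; exact hNB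
            have hskip : scanC C (c :: t) = k ++ scanC C u := by
              rw [← hu]
              apply scanC_skip C k u
              intro p hp m hm
              rcases Nat.eq_zero_or_pos p with h0 | h1
              · subst h0
                simpa [hu] using hCnone m hm
              · exact Hs2 u hNBku p hp h1 m hm
            have hfap : (C ++ [(k, v)]).find? (fun p => p.1.isPrefixOf (c :: t)) = some (k, v) := by
              rw [List.find?_append, hf]
              simp [hkp]
            rw [hskip, repl1_prefix k v (scanC C u) hk,
                scanC_cons_some (C ++ [(k, v)]) c t (k, v) hfap]
            simp only [hdrop]
            congr 1
            apply ih u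
            · have := congrArg List.length hu
              have h1 : 1 ≤ k.length := by
                cases k with | nil => exact absurd rfl hk | cons a b => simp
              simp at this hs
              omega
            · exact noBad_infix hNB (List.IsSuffix.isInfix ⟨k, hu⟩)
          · -- no match at this position at all
            have hnotk : ¬ k.isPrefixOf (c :: scanC C t) = true := by
              simp only [List.isPrefixOf_iff_prefix]
              intro hcon
              cases hkc : k with
              | nil => exact hk hkc
              | cons e k' =>
                subst hkc
                obtain ⟨he, h'⟩ := List.cons_prefix_cons.mp hcon
                subst he
                have h2 : k' <+: t := by
                  apply noCreate C t.length t k' le_rfl _ h'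
                  intro q hq m hm hrel
                  exact Hnc (q + 1) (by simpa using hq) (by omega) m hm hrel
                exact hkp (List.isPrefixOf_iff_prefix.mpr (List.cons_prefix_cons.mpr ⟨rfl, h2⟩))
            have hfap : (C ++ [(k, v)]).find? (fun p => p.1.isPrefixOf (c :: t)) = none := by
              rw [List.find?_append, hf]
              simp [hkp]
            rw [scanC_cons_none C c t hf, repl1_cons_neg k v c (scanC C t) hnotk,
                scanC_cons_none (C ++ [(k, v)]) c t hfap]
            congr 1
            apply ih t (by simpa using Nat.le_of_succ_le_succ hs)
            exact noBad_infix hNB (List.IsSuffix.isInfix ⟨[c], rfl⟩)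
  exact fun s => main s.length s le_rfl

-- clean discharge of the two side conditions when no straddling is possible at all
theorem spot1_clean {C : List (List Char × List Char)} {k : List Char}
    (F : ∀ m ∈ C, ∀ q < m.2.length, ¬ (m.2.drop q <+: k) ∧ ¬ (k <+: m.2.drop q)) :
    ∀ m ∈ C, ∀ t', NoBad (m.1 ++ t') → ∀ q < m.2.length,
      ¬ k <+: (m.2.drop q ++ scanC C t') :=
  fun m hm _ _ q hq => clean1 (F m hm q hq).1 (F m hm q hq).2

theorem spot2_clean {C : List (List Char × List Char)} {k : List Char}
    (F : ∀ m ∈ C, ∀ p < k.length, 1 ≤ p → ¬ (k.drop p <+: m.1) ∧ ¬ (m.1 <+: k.drop p)) :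
    ∀ u, NoBad (k ++ u) → ∀ p < k.length, 1 ≤ p → ∀ m ∈ C,
      ¬ m.1 <+: (k.drop p ++ u) :=
  fun _ _ p hp h1 m hm => clean1 (F m hm p hp h1).1 (F m hm p hp h1).2


-- ---- the four dirty side conditions, using the absence of the cascade substrings ----
theorem cleanQ {k vm : List Char}
    (R : ∀ q < vm.length, ¬ (vm.drop q <+: k) ∧ ¬ (k <+: vm.drop q))
    {q : Nat} (hq : q < vm.length) {X : List Char} (hcon : k <+: vm.drop q ++ X) : False :=
  (prefix_split hcon).elim (R q hq).1 (R q hq).2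

theorem hs1_escape :
    ∀ m ∈ pairsB.take 4, ∀ t', NoBad (m.1 ++ t') → ∀ q < m.2.length,
      ¬ "escape".toList <+: (m.2.drop q ++ scanC (pairsB.take 4) t') := by
  intro m hm t' hNB q hq hcon
  fin_cases hm
  · exact cleanQ (by decide) hq hcon
  · exact cleanQ (by decide) hq hcon
  · exact cleanQ (by decide) hq hcon
  · -- spacebar → space: a trailing 'e' of the value can begin a new 'escape'
    by_cases h4 : q = 4
    · subst h4
      have ha : "space".toList.drop 4 <+: "escape".toList := by decide
      have h1 := prefix_drop ha hcon
      have he : ("space".toList.drop 4).length = 1 := by decide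
      rw [he] at h1
      have h3 := noCreate (pairsB.take 4) t'.length t' _ le_rfl (by decide) h1
      obtain ⟨w, rfl⟩ := h3
      refine hNB "spacebarscape".toList (by decide) (List.IsPrefix.isInfix ⟨w, ?_⟩)
      rw [← List.append_assoc,
        (by decide : "spacebar".toList ++ "escape".toList.drop 1 = "spacebarscape".toList)]
    · exact (prefix_split hcon).elim
        (((by decide : ∀ q < "space".toList.length, q ≠ 4 →
            ¬ ("space".toList.drop q <+: "escape".toList) ∧
            ¬ ("escape".toList <+: "space".toList.drop q)) q hq h4)).1
        (((by decide : ∀ q < "space".toList.length, q ≠ 4 →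
            ¬ ("space".toList.drop q <+: "escape".toList) ∧
            ¬ ("escape".toList <+: "space".toList.drop q)) q hq h4)).2

theorem hs1_pagedown :
    ∀ m ∈ pairsB.take 6, ∀ t', NoBad (m.1 ++ t') → ∀ q < m.2.length,
      ¬ "pagedown".toList <+: (m.2.drop q ++ scanC (pairsB.take 6) t') := by
  intro m hm t' hNB q hq hcon
  fin_cases hm
  · exact cleanQ (by decide) hq hcon
  · exact cleanQ (by decide) hq hcon
  · exact cleanQ (by decide) hq hcon
  · exact cleanQ (by decide) hq hcon
  · exact cleanQ (by decide) hq hcon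
  · -- pageup → pgup: the trailing 'p' of the value can begin a new 'pagedown'
    by_cases h3 : q = 3
    · subst h3
      have ha : "pgup".toList.drop 3 <+: "pagedown".toList := by decide
      have h1 := prefix_drop ha hcon
      have he : ("pgup".toList.drop 3).length = 1 := by decide
      rw [he] at h1
      have h3 := noCreate (pairsB.take 6) t'.length t' _ le_rfl (by decide) h1
      obtain ⟨w, rfl⟩ := h3
      refine hNB "pageupagedown".toList (by decide) (List.IsPrefix.isInfix ⟨w, ?_⟩)
      rw [← List.append_assoc,
        (by decide : "pageup".toList ++ "pagedown".toList.drop 1 = "pageupagedown".toList)]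
    · exact (prefix_split hcon).elim
        (((by decide : ∀ q < "pgup".toList.length, q ≠ 3 →
            ¬ ("pgup".toList.drop q <+: "pagedown".toList) ∧
            ¬ ("pagedown".toList <+: "pgup".toList.drop q)) q hq h3)).1
        (((by decide : ∀ q < "pgup".toList.length, q ≠ 3 →
            ¬ ("pgup".toList.drop q <+: "pagedown".toList) ∧
            ¬ ("pagedown".toList <+: "pgup".toList.drop q)) q hq h3)).2

theorem hs2_arrowup :
    ∀ u, NoBad ("arrowup".toList ++ u) → ∀ p < "arrowup".toList.length, 1 ≤ p →
      ∀ m ∈ pairsB.take 7, ¬ m.1 <+: ("arrowup".toList.drop p ++ u) := by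
  intro u hNB p hp h1p m hm hcon
  fin_cases hm
  · exact (prefix_split hcon).elim
      (((by decide : ∀ p < "arrowup".toList.length, 1 ≤ p →
          ¬ ("arrowup".toList.drop p <+: "control".toList) ∧
          ¬ ("control".toList <+: "arrowup".toList.drop p)) p hp h1p)).1
      (((by decide : ∀ p < "arrowup".toList.length, 1 ≤ p →
          ¬ ("arrowup".toList.drop p <+: "control".toList) ∧
          ¬ ("control".toList <+: "arrowup".toList.drop p)) p hp h1p)).2
  · exact (prefix_split hcon).elim
      (((by decide : ∀ p < "arrowup".toList.length, 1 ≤ p →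
          ¬ ("arrowup".toList.drop p <+: "option".toList) ∧
          ¬ ("option".toList <+: "arrowup".toList.drop p)) p hp h1p)).1
      (((by decide : ∀ p < "arrowup".toList.length, 1 ≤ p →
          ¬ ("arrowup".toList.drop p <+: "option".toList) ∧
          ¬ ("option".toList <+: "arrowup".toList.drop p)) p hp h1p)).2
  · exact (prefix_split hcon).elim
      (((by decide : ∀ p < "arrowup".toList.length, 1 ≤ p →
          ¬ ("arrowup".toList.drop p <+: "windows".toList) ∧
          ¬ ("windows".toList <+: "arrowup".toList.drop p)) p hp h1p)).1
      (((by decide : ∀ p < "arrowup".toList.length, 1 ≤ p →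
          ¬ ("arrowup".toList.drop p <+: "windows".toList) ∧
          ¬ ("windows".toList <+: "arrowup".toList.drop p)) p hp h1p)).2
  · exact (prefix_split hcon).elim
      (((by decide : ∀ p < "arrowup".toList.length, 1 ≤ p →
          ¬ ("arrowup".toList.drop p <+: "spacebar".toList) ∧
          ¬ ("spacebar".toList <+: "arrowup".toList.drop p)) p hp h1p)).1
      (((by decide : ∀ p < "arrowup".toList.length, 1 ≤ p →
          ¬ ("arrowup".toList.drop p <+: "spacebar".toList) ∧
          ¬ ("spacebar".toList <+: "arrowup".toList.drop p)) p hp h1p)).2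
  · exact (prefix_split hcon).elim
      (((by decide : ∀ p < "arrowup".toList.length, 1 ≤ p →
          ¬ ("arrowup".toList.drop p <+: "escape".toList) ∧
          ¬ ("escape".toList <+: "arrowup".toList.drop p)) p hp h1p)).1
      (((by decide : ∀ p < "arrowup".toList.length, 1 ≤ p →
          ¬ ("arrowup".toList.drop p <+: "escape".toList) ∧
          ¬ ("escape".toList <+: "arrowup".toList.drop p)) p hp h1p)).2
  · -- pageup overlapping the trailing 'p' of 'arrowup'
    by_cases h6 : p = 6
    · subst h6
      have ha : "arrowup".toList.drop 6 <+: "pageup".toList := by decide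
      have h1 := prefix_drop ha hcon
      have he : ("arrowup".toList.drop 6).length = 1 := by decide
      rw [he] at h1
      obtain ⟨w, rfl⟩ := h1
      refine hNB "arrowupageup".toList (by decide) (List.IsPrefix.isInfix ⟨w, ?_⟩)
      rw [← List.append_assoc,
        (by decide : "arrowup".toList ++ "pageup".toList.drop 1 = "arrowupageup".toList)]
    · exact (prefix_split hcon).elim
        (((by decide : ∀ p < "arrowup".toList.length, 1 ≤ p → p ≠ 6 →
            ¬ ("arrowup".toList.drop p <+: "pageup".toList) ∧
            ¬ ("pageup".toList <+: "arrowup".toList.drop p)) p hp h1p h6)).1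
        (((by decide : ∀ p < "arrowup".toList.length, 1 ≤ p → p ≠ 6 →
            ¬ ("arrowup".toList.drop p <+: "pageup".toList) ∧
            ¬ ("pageup".toList <+: "arrowup".toList.drop p)) p hp h1p h6)).2
  · -- pagedown overlapping the trailing 'p' of 'arrowup'
    by_cases h6 : p = 6
    · subst h6
      have ha : "arrowup".toList.drop 6 <+: "pagedown".toList := by decide
      have h1 := prefix_drop ha hcon
      have he : ("arrowup".toList.drop 6).length = 1 := by decide
      rw [he] at h1
      obtain ⟨w, rfl⟩ := h1
      refine hNB "arrowupagedown".toList (by decide) (List.IsPrefix.isInfix ⟨w, ?_⟩)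
      rw [← List.append_assoc,
        (by decide : "arrowup".toList ++ "pagedown".toList.drop 1 = "arrowupagedown".toList)]
    · exact (prefix_split hcon).elim
        (((by decide : ∀ p < "arrowup".toList.length, 1 ≤ p → p ≠ 6 →
            ¬ ("arrowup".toList.drop p <+: "pagedown".toList) ∧
            ¬ ("pagedown".toList <+: "arrowup".toList.drop p)) p hp h1p h6)).1
        (((by decide : ∀ p < "arrowup".toList.length, 1 ≤ p → p ≠ 6 →
            ¬ ("arrowup".toList.drop p <+: "pagedown".toList) ∧
            ¬ ("pagedown".toList <+: "arrowup".toList.drop p)) p hp h1p h6)).2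

-- ---- the 11-step chain ----
theorem chain (l : List Char) (hl : NoBad l) :
    repl1 "arrowright".toList "right".toList (repl1 "arrowleft".toList "left".toList (repl1 "arrowdown".toList "down".toList (repl1 "arrowup".toList "up".toList (repl1 "pagedown".toList "pgdn".toList (repl1 "pageup".toList "pgup".toList (repl1 "escape".toList "esc".toList (repl1 "spacebar".toList "space".toList (repl1 "windows".toList "win".toList (repl1 "option".toList "alt".toList (repl1 "control".toList "ctrl".toList l))))))))))
      = scanC pairsB l := by
  have h0 : repl1 "control".toList "ctrl".toList (scanC (pairsB.take 0) l) = scanC (pairsB.take 1) l :=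
    step (pairsB.take 0) "control".toList "ctrl".toList (by decide) (by decide) (by decide) (spot1_clean (by decide)) (spot2_clean (by decide)) l hl
  have h1 : repl1 "option".toList "alt".toList (scanC (pairsB.take 1) l) = scanC (pairsB.take 2) l :=
    step (pairsB.take 1) "option".toList "alt".toList (by decide) (by decide) (by decide) (spot1_clean (by decide)) (spot2_clean (by decide)) l hl
  have h2 : repl1 "windows".toList "win".toList (scanC (pairsB.take 2) l) = scanC (pairsB.take 3) l :=
    step (pairsB.take 2) "windows".toList "win".toList (by decide) (by decide) (by decide) (spot1_clean (by decide)) (spot2_clean (by decide)) l hl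
  have h3 : repl1 "spacebar".toList "space".toList (scanC (pairsB.take 3) l) = scanC (pairsB.take 4) l :=
    step (pairsB.take 3) "spacebar".toList "space".toList (by decide) (by decide) (by decide) (spot1_clean (by decide)) (spot2_clean (by decide)) l hl
  have h4 : repl1 "escape".toList "esc".toList (scanC (pairsB.take 4) l) = scanC (pairsB.take 5) l :=
    step (pairsB.take 4) "escape".toList "esc".toList (by decide) (by decide) (by decide) hs1_escape (spot2_clean (by decide)) l hl
  have h5 : repl1 "pageup".toList "pgup".toList (scanC (pairsB.take 5) l) = scanC (pairsB.take 6) l :=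
    step (pairsB.take 5) "pageup".toList "pgup".toList (by decide) (by decide) (by decide) (spot1_clean (by decide)) (spot2_clean (by decide)) l hl
  have h6 : repl1 "pagedown".toList "pgdn".toList (scanC (pairsB.take 6) l) = scanC (pairsB.take 7) l :=
    step (pairsB.take 6) "pagedown".toList "pgdn".toList (by decide) (by decide) (by decide) hs1_pagedown (spot2_clean (by decide)) l hl
  have h7 : repl1 "arrowup".toList "up".toList (scanC (pairsB.take 7) l) = scanC (pairsB.take 8) l :=
    step (pairsB.take 7) "arrowup".toList "up".toList (by decide) (by decide) (by decide) (spot1_clean (by decide)) hs2_arrowup l hl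
  have h8 : repl1 "arrowdown".toList "down".toList (scanC (pairsB.take 8) l) = scanC (pairsB.take 9) l :=
    step (pairsB.take 8) "arrowdown".toList "down".toList (by decide) (by decide) (by decide) (spot1_clean (by decide)) (spot2_clean (by decide)) l hl
  have h9 : repl1 "arrowleft".toList "left".toList (scanC (pairsB.take 9) l) = scanC (pairsB.take 10) l :=
    step (pairsB.take 9) "arrowleft".toList "left".toList (by decide) (by decide) (by decide) (spot1_clean (by decide)) (spot2_clean (by decide)) l hl
  have h10 : repl1 "arrowright".toList "right".toList (scanC (pairsB.take 10) l) = scanC (pairsB.take 11) l :=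
    step (pairsB.take 10) "arrowright".toList "right".toList (by decide) (by decide) (by decide) (spot1_clean (by decide)) (spot2_clean (by decide)) l hl
  rw [show scanC (pairsB.take 0) l = l from scanC_nil_table l] at h0
  rw [h0, h1, h2, h3, h4, h5, h6, h7, h8, h9, h10]
  congr 1

-- ---- A reduced to the chain ----
theorem A_toList (s : String) (h : NoBad s.toList) :
    (normalize_shortcut s).toList = scanC pairsB s.toList := by
  simp only [normalize_shortcut, pairsA, List.foldl_cons, List.foldl_nil,
    PySem.Str.toList_replace]
  rw [replace_eq _ _ _ (by decide), replace_eq _ _ _ (by decide), replace_eq _ _ _ (by decide),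
      replace_eq _ _ _ (by decide), replace_eq _ _ _ (by decide), replace_eq _ _ _ (by decide),
      replace_eq _ _ _ (by decide), replace_eq _ _ _ (by decide), replace_eq _ _ _ (by decide),
      replace_eq _ _ _ (by decide), replace_eq _ _ _ (by decide), replace_eq _ _ _ (by decide),
      replace_eq _ _ _ (by decide), replace_eq _ _ _ (by decide), replace_eq _ _ _ (by decide),
      replace_eq _ _ _ (by decide), replace_eq _ _ _ (by decide), replace_eq _ _ _ (by decide)]
  rw [repl1_id "shift".toList (by decide), repl1_id "tab".toList (by decide),
      repl1_id "enter".toList (by decide), repl1_id "delete".toList (by decide),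
      repl1_id "insert".toList (by decide), repl1_id "home".toList (by decide),
      repl1_id "end".toList (by decide)]
  exact chain s.toList h

theorem normalize_shortcut_spec : Claim_equal_normalize_shortcut := by
  unfold Claim_equal_normalize_shortcut
  intro s _ hPre
  unfold Spec_normalize_shortcut
  have hNB : NoBad s.toList := noBad_of_pre s hPre
  apply String.toList_inj.mp
  rw [A_toList s hNB]
  unfold normalize_shortcut_alt
  rw [String.toList_ofList]
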